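-- pv_equiv track=rewrite | github.com/NipunaMadhushan/HackerRank-Interview-Preparation-Kit | Greedy Algorithms/Greedy Florist.py | getMinimumCost
-- ===== SOURCE A (Python) =====
-- def getMinimumCost(k, n, c):
--     c.sort()
--     c.reverse()
--
--     prev_pur = 0
--     index = 0
--     cost = 0
--     while index < n:
--         cost += sum(c[index:min(n, index+k)]) * (prev_pur + 1)
--         index += k
--         prev_pur += 1
--
--     return cost
-- ===== SOURCE B (Python) =====
-- def getMinimumCost(k, n, c):
--     c.sort(reverse=True)
--     cost = 0
--     suffix = 0
--     for i in range(min(n, len(c)) - 1, -1, -1):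
--         suffix += c[i]
--         if i % k == 0:
--             cost += suffix
--     return cost
-- ===== Notes on version B (the rewrite author's own statement) =====
-- stated objective: alternative
-- what changed: Replaces A's forward while-loop over k-sized slice blocks scaled by a purchase counter with a single backward pass that keeps a running suffix sum and adds it to the cost at every index divisible by k, eliminating both the slicing and the multiplier entirely (the answer equals the sum of the suffix sums starting at multiples of k).
import Mathlib
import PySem

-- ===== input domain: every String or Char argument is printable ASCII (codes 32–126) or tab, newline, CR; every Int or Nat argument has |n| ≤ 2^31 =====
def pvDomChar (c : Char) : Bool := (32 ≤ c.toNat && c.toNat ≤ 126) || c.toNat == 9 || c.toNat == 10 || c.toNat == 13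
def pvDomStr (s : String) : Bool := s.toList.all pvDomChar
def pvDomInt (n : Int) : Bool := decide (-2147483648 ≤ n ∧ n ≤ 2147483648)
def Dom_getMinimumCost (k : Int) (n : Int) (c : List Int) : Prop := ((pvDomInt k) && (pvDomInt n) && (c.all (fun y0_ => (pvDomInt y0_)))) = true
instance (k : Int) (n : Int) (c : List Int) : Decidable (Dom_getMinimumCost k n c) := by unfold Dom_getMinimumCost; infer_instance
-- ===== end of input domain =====

-- B replaces A's forward block-slice loop with a backward pass over a running suffix sum, added at every
-- index divisible by k (objective: alternative, no multipliers or slices). Both Pythons sort c in place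
-- ending descending; the claim is about the return value.

-- ===== PORT A =====
-- the while loop: state (index, prev_pur, cost); fuel n.toNat suffices since index grows by k ≥ 1 per step (inside Pre_)
def pvALoop (k n : Int) (cs : List Int) : Nat → Int → Int → Int → Int
  | 0, _, _, cost => cost
  | fuel + 1, index, prev_pur, cost =>
    if index < n then
      pvALoop k n cs fuel (index + k) (prev_pur + 1)
        (cost + (PySem.List.slice cs (some index) (some (min n (index + k)))).sum * (prev_pur + 1))
    else cost

def getMinimumCost (k : Int) (n : Int) (c : List Int) : Int :=
  let cs := (PySem.List.sorted c (fun x => x) false).reverse   -- c.sort(); c.reverse()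
  pvALoop k n cs n.toNat 0 0 0

-- ===== PORT B =====
def getMinimumCost_alt (k : Int) (n : Int) (c : List Int) : Int :=
  let cs := PySem.List.sorted c (fun x => x) true              -- c.sort(reverse=True)
  -- for i in range(min(n, len(c)) - 1, -1, -1): suffix += c[i]; if i % k == 0: cost += suffix
  ((PySem.List.pyRange (min n (cs.length : Int) - 1) (-1) (-1)).foldl
    (fun (p : Int × Int) i =>
      let suffix := p.2 + PySem.List.pyGetD cs i 0
      (if PySem.Int.mod i k = 0 then p.1 + suffix else p.1, suffix)) (0, 0)).1

-- ===== PRECONDITION & SPEC =====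
-- Pre_ excludes only k ≤ 0 with n > 0, where A's while loop never terminates (index += k makes no progress).
def Pre_getMinimumCost (k : Int) (n : Int) (c : List Int) : Prop := 0 < k ∨ n ≤ 0
instance (k : Int) (n : Int) (c : List Int) : Decidable (Pre_getMinimumCost k n c) := by unfold Pre_getMinimumCost; infer_instance
def pvWitness_getMinimumCost : Int × Int × List Int := (2, 3, [2, 5, 6])

def Spec_getMinimumCost (k : Int) (n : Int) (c : List Int) (out : Int) : Prop := out = getMinimumCost_alt k n c
instance (k : Int) (n : Int) (c : List Int) (out : Int) : Decidable (Spec_getMinimumCost k n c out) := by unfold Spec_getMinimumCost; infer_instance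

-- ===== CLAIM (what is proved, stated in full; the proofs are below) =====
def Claim_equal_getMinimumCost : Prop := ∀ (k : Int) (n : Int) (c : List Int), Dom_getMinimumCost k n c → Pre_getMinimumCost k n c → Spec_getMinimumCost k n c (getMinimumCost k n c)

-- ===== LEMMAS AND PROOFS =====

-- ascending sort followed by reverse = descending sort (on Int the descending arrangement is unique)
lemma sortDesc_eq (c : List Int) :
    (PySem.List.sorted c (fun x => x) false).reverse = PySem.List.sorted c (fun x => x) true := by
  refine List.Perm.eq_of_pairwise (le := fun a b : Int => b ≤ a)
    (fun a b _ _ hab hba => le_antisymm hba hab) ?_ ?_ ?_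
  · exact (List.pairwise_reverse).mpr ((PySem.List.sorted_pairwise c (fun x => x)).imp fun h => h)
  · exact PySem.List.sorted_pairwise_rev c (fun x => x)
  · exact ((List.reverse_perm _).trans (PySem.List.sorted_perm c (fun x => x) false)).trans
      ((PySem.List.sorted_perm c (fun x => x) true).symm)

lemma sum_eq_sum_getD (l : List Int) : l.sum = ∑ i ∈ Finset.range l.length, l.getD i 0 := by
  induction l with
  | nil => simp
  | cons x xs ih =>
      rw [List.sum_cons, List.length_cons, Finset.sum_range_succ']
      simp only [List.getD_cons_succ, List.getD_cons_zero, ih]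
      exact add_comm x _

lemma sum_drop_take (l : List Int) (a t : Nat) :
    ((l.drop a).take t).sum = ∑ i ∈ Finset.Ico a (min (a + t) l.length), l.getD i 0 := by
  rw [sum_eq_sum_getD, List.length_take, List.length_drop]
  by_cases h : a ≤ l.length
  · have e1 : min (a + t) l.length = a + min t (l.length - a) := by omega
    rw [e1, Finset.sum_Ico_eq_sum_range]
    have e2 : a + min t (l.length - a) - a = min t (l.length - a) := by omega
    rw [e2]
    apply Finset.sum_congr rfl
    intro i hi
    simp only [Finset.mem_range] at hi
    rw [List.getD_eq_getElem?_getD, List.getD_eq_getElem?_getD, List.getElem?_take,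
        List.getElem?_drop]
    simp [show i < t by omega]
  · have h1 : l.length - a = 0 := by omega
    have h2 : min (a + t) l.length = l.length := by omega
    rw [h1, h2]
    have e : Finset.Ico a l.length = ∅ := Finset.Ico_eq_empty (by omega)
    simp [e]

-- on one block [min m a, min m b) with b = a + K and a = p*K, the flat multiplier i/K is constantly p
lemma block_sum (cs : List Int) (K p m a b : Nat) (hK : 0 < K) (ha : a = p * K) (hb : b = a + K) :
    ∑ i ∈ Finset.Ico (min m a) (min m b), cs.getD i 0 * ((i / K : Nat) + 1 : Int)
      = (∑ i ∈ Finset.Ico (min m a) (min m b), cs.getD i 0) * ((p : Int) + 1) := by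
  rw [Finset.sum_mul]
  apply Finset.sum_congr rfl
  intro i hi
  simp only [Finset.mem_Ico] at hi
  have h1 : a ≤ i ∧ i < b := by omega
  have h2 : (p + 1) * K = a + K := by rw [ha]; ring
  have hd : i / K = p := Nat.div_eq_of_lt_le (by rw [← ha]; exact h1.1) (by rw [h2]; omega)
  rw [hd]

-- A's loop invariant: from index = p*K with prev_pur = p the loop adds the flat sum over [min m (p*K), m)
lemma loop_eq (k : Int) (K : Nat) (hk : k = (K : Int)) (hK : 0 < K) (n : Int) (cs : List Int)
    (m : Nat) (hm : (m : Int) = min n (cs.length : Int) ∨ (m = 0 ∧ min n (cs.length : Int) ≤ 0)) :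
    ∀ (fuel p : Nat) (cost : Int), n ≤ ((p * K : Nat) : Int) + ((fuel * K : Nat) : Int) →
      pvALoop k n cs fuel ((p * K : Nat) : Int) (p : Int) cost
        = cost + ∑ i ∈ Finset.Ico (min m (p * K)) m, cs.getD i 0 * ((i / K : Nat) + 1 : Int) := by
  intro fuel
  induction fuel with
  | zero =>
      intro p cost hle
      have hmp : m ≤ p * K := by
        rcases hm with h | ⟨h, _⟩
        · simp only [Nat.zero_mul, Nat.cast_zero] at hle
          have : (m : Int) ≤ n := by omega
          omega
        · omega
      have : min m (p * K) = m := by omega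
      rw [this, Finset.Ico_self, Finset.sum_empty]
      simp [pvALoop]
  | succ fuel ih =>
      intro p cost hle
      simp only [pvALoop]
      by_cases hcond : ((p * K : Nat) : Int) < n
      · rw [if_pos hcond]
        have e1 : ((p * K : Nat) : Int) + k = (((p + 1) * K : Nat) : Int) := by
          push_cast [hk]; ring
        have e2 : (p : Int) + 1 = (((p + 1 : Nat)) : Int) := by push_cast; ring
        rw [e1, e2]
        have hcnd : n ≤ (((p + 1) * K : Nat) : Int) + ((fuel * K : Nat) : Int) := by
          have eq1 : (((p + 1) * K : Nat) : Int) + ((fuel * K : Nat) : Int)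
              = ((p * K : Nat) : Int) + (((fuel + 1) * K : Nat) : Int) := by push_cast; ring
          rw [eq1]; exact hle
        rw [ih (p + 1) _ hcnd]
        set q := p * K with hq
        set r := (p + 1) * K with hrdef
        have hr : r = q + K := by rw [hrdef, hq]; ring
        have hmk : m = min n.toNat cs.length := by
          rcases hm with h | ⟨h1, h2⟩
          · omega
          · omega
        have hb0 : (0 : Int) ≤ min n ((r : Nat) : Int) := by omega
        have hs : PySem.List.slice cs (some ((q : Nat) : Int)) (some (min n ((r : Nat) : Int)))
            = (cs.drop q).take ((min n ((r : Nat) : Int)).toNat - q) := by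
          rw [PySem.List.slice_toNat cs (Int.natCast_nonneg q) hb0]
          simp
        rw [hs, sum_drop_take]
        have emin : min (q + ((min n ((r : Nat) : Int)).toNat - q)) cs.length = min m r := by
          omega
        rw [emin]
        have eIco : Finset.Ico q (min m r) = Finset.Ico (min m q) (min m r) := by
          apply Finset.ext
          intro x
          simp only [Finset.mem_Ico]
          omega
        rw [eIco]
        rw [← Finset.sum_Ico_consecutive _ (show min m q ≤ min m r by omega)
              (show min m r ≤ m by omega)]
        rw [block_sum cs K p m q r hK hq hr]
        push_cast
        ring
      · rw [if_neg hcond]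
        have hmp : m ≤ p * K := by
          rcases hm with h | ⟨h, _⟩
          · omega
          · omega
        have : min m (p * K) = m := by omega
        rw [this, Finset.Ico_self, Finset.sum_empty, add_zero]

-- number of indices j < m with j % K = 0 (the times B's backward pass adds the suffix)
def pvCnt (K : Nat) : Nat → Nat
  | 0 => 0
  | m + 1 => pvCnt K m + (if m % K = 0 then 1 else 0)

lemma pvCnt_succ (K : Nat) : ∀ m, pvCnt K (m + 1) = m / K + 1 := by
  intro m
  induction m with
  | zero => simp [pvCnt, Nat.zero_mod, Nat.zero_div]
  | succ m ih =>
      show pvCnt K (m + 1) + (if (m + 1) % K = 0 then 1 else 0) = (m + 1) / K + 1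
      rw [ih, Nat.succ_div]
      have : (m + 1) % K = 0 ↔ K ∣ (m + 1) := Nat.dvd_iff_mod_eq_zero.symm
      by_cases hd : K ∣ (m + 1)
      · rw [if_pos (this.mpr hd), if_pos hd]
      · rw [if_neg (fun h => hd (this.mp h)), if_neg hd]

-- B's loop invariant: folding indices m-1 down to 0 from state (cost, suffix)
lemma bloop_eq (k : Int) (K : Nat) (hk : k = (K : Int)) (hK : 0 < K) (cs : List Int) :
    ∀ (m : Nat) (cost suffix : Int),
      (PySem.List.pyRange ((m : Int) - 1) (-1) (-1)).foldl
        (fun (p : Int × Int) i =>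
          let s := p.2 + PySem.List.pyGetD cs i 0
          (if PySem.Int.mod i k = 0 then p.1 + s else p.1, s)) (cost, suffix)
      = (cost + suffix * (pvCnt K m : Int)
           + ∑ i ∈ Finset.range m, cs.getD i 0 * ((i / K : Nat) + 1 : Int),
         suffix + ∑ i ∈ Finset.range m, cs.getD i 0) := by
  intro m
  induction m with
  | zero =>
      intro cost suffix
      rw [PySem.List.pyRange_neg_one_eq_nil (by norm_num)]
      simp [pvCnt]
  | succ m ih =>
      intro cost suffix
      have ha : ((m + 1 : Nat) : Int) - 1 = (m : Int) := by push_cast; ring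
      rw [ha, PySem.List.pyRange_neg_one_cons (by omega), List.foldl_cons]
      simp only
      rw [PySem.List.pyGetD_natCast, hk, PySem.Int.mod_natCast]
      have hmod : (((m % K : Nat) : Int) = 0) ↔ (m % K = 0) := by omega
      simp only [hk] at ih
      rw [ih]
      have hq : pvCnt K (m + 1) = m / K + 1 := pvCnt_succ K m
      by_cases h0 : m % K = 0
      · rw [if_pos (hmod.mpr h0)]
        have hc : pvCnt K m = m / K := by
          have : pvCnt K (m + 1) = pvCnt K m + 1 := by simp [pvCnt, h0]
          omega
        rw [Finset.sum_range_succ, Finset.sum_range_succ, Prod.mk.injEq]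
        constructor
        · rw [hc, hq]
          push_cast
          ring
        · ring
      · rw [if_neg (fun h => h0 (hmod.mp h))]
        have hc : pvCnt K m = m / K + 1 := by
          have : pvCnt K (m + 1) = pvCnt K m := by simp [pvCnt, h0]
          omega
        rw [Finset.sum_range_succ, Finset.sum_range_succ, Prod.mk.injEq]
        constructor
        · rw [hc, hq]
          push_cast
          ring
        · ring

-- ===== VERDICT (by name: the statement is the Claim_ definition above) =====
theorem getMinimumCost_spec : Claim_equal_getMinimumCost := by
  intro k n c _ hpre
  unfold Spec_getMinimumCost
  simp only [getMinimumCost, getMinimumCost_alt]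
  rw [sortDesc_eq]
  set cs := PySem.List.sorted c (fun x => x) true with hcs
  by_cases hn : n ≤ 0
  · have h0 : n.toNat = 0 := by omega
    have hr : PySem.List.pyRange (min n (cs.length : Int) - 1) (-1) (-1) = [] :=
      PySem.List.pyRange_neg_one_eq_nil (by omega)
    rw [h0, hr]
    simp [pvALoop]
  · have hkpos : 0 < k := hpre.resolve_right hn
    set K := k.toNat with hKdef
    have hkK : k = (K : Int) := by omega
    have hKpos : 0 < K := by omega
    set m := min n.toNat cs.length with hmdef
    have hm : (m : Int) = min n (cs.length : Int) ∨ (m = 0 ∧ min n (cs.length : Int) ≤ 0) := by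
      left; omega
    have hfuel : n ≤ ((0 * K : Nat) : Int) + ((n.toNat * K : Nat) : Int) := by
      have h1 : n.toNat ≤ n.toNat * K := Nat.le_mul_of_pos_right _ hKpos
      have h2 : ((0 * K : Nat) : Int) = 0 := by simp
      omega
    have hloop := loop_eq k K hkK hKpos n cs m hm n.toNat 0 0 hfuel
    simp only [Nat.zero_mul, Nat.cast_zero, Nat.min_zero, zero_add] at hloop
    rw [hloop]
    have hM : min n (cs.length : Int) = (m : Int) := by omega
    rw [hM, bloop_eq k K hkK hKpos cs m 0 0]
    simp only [zero_mul, zero_add, Finset.range_eq_Ico]
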